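-- pv_equiv track=rewrite | github.com/WebCoder49/British_Informatics_Olympiad | 2023final-BAO-2.py | connected
-- ===== SOURCE A (Python) =====
-- def connected(a:set, b:set):
--     """Are words a and b lexically connected?"""
--     b = b.copy()
--     one_added = False
--     one_removed = False
--     for letter in a:
--         if letter in b:
--             # Don't count in reverse direction
--             b.remove(letter)
--         else: # In a, not b so removed
--             if one_removed:
--                 # One already removed - cannot remove 2
--                 return False
--             one_removed = True
--     # Should only have one max char left added to b
--     return len(b) <= 1
-- ===== SOURCE B (Python) =====
-- def connected(a: set, b: set):
--     """Are words a and b lexically connected?"""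
--     return len(a - b) <= 1 and len(b - a) <= 1
-- ===== Notes on version B (the rewrite author's own statement) =====
-- stated objective: simpler
-- what changed: Replaces the stateful pass (copy of b, in-place removal, one_removed flag, early return) by a pure boolean combination of the two set-difference cardinalities: len(a-b) <= 1 and len(b-a) <= 1.
import Mathlib
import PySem

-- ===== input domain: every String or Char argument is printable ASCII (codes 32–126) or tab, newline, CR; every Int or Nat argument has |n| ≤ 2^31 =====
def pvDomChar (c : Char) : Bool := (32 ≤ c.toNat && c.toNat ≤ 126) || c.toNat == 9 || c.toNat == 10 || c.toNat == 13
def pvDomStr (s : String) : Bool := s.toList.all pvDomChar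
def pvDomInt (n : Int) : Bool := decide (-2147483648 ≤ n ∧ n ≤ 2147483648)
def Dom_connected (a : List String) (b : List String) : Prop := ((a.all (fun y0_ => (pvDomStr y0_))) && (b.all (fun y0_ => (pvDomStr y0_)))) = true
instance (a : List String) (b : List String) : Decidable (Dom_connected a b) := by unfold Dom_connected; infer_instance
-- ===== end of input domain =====

-- B replaces A's stateful scan (mutable copy of b, one_removed flag, early return)
-- by a boolean combination of the two set-difference cardinalities: simpler, same cost.


-- ===== PORT A =====
-- the 'for letter in a' loop with the working copy of b and the one_removed flag
def connectedLoop (a : List String) (b : List String) (oneRemoved : Bool) : Bool :=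
  match a with
  | [] => decide (b.length ≤ 1)                  -- return len(b) <= 1
  | x :: rest =>
    if b.contains x then
      connectedLoop rest (b.erase x) oneRemoved  -- b.remove(letter)
    else if oneRemoved then
      false                                      -- return False
    else
      connectedLoop rest b true                  -- one_removed = True

def connected (a : List String) (b : List String) : Bool :=
  connectedLoop a b false

-- ===== PORT B =====
-- len(a - b) <= 1 and len(b - a) <= 1  (set difference = filter on the distinct-elements list)
def connected_alt (a : List String) (b : List String) : Bool :=
  decide ((a.filter (fun x => !b.contains x)).length ≤ 1) &&
  decide ((b.filter (fun y => !a.contains y)).length ≤ 1)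

-- ===== PRECONDITION & SPEC =====
-- Pre_ excludes lists with duplicate elements: they encode no Python set under the
-- list-of-DISTINCT-elements convention (both Pythons receive the deduplicated set there).
def Pre_connected (a : List String) (b : List String) : Prop := a.Nodup ∧ b.Nodup
instance (a : List String) (b : List String) : Decidable (Pre_connected a b) := by unfold Pre_connected; infer_instance
def pvWitness_connected : List String × List String := (["cat", "at"], ["at", "art"])
def Spec_connected (a : List String) (b : List String) (out : Bool) : Prop := out = connected_alt a b
instance (a : List String) (b : List String) (out : Bool) : Decidable (Spec_connected a b out) := by unfold Spec_connected; infer_instance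

-- ===== CLAIM (what is proved, stated in full; the proofs are below) =====
def Claim_equal_connected : Prop := ∀ (a : List String) (b : List String), Dom_connected a b → Pre_connected a b → Spec_connected a b (connected a b)

-- ===== LEMMAS AND PROOFS =====

-- loop invariant: the pass over a computes the two difference cardinalities
theorem connectedLoop_eq (a : List String) : ∀ (b : List String) (flag : Bool),
    a.Nodup → b.Nodup →
    connectedLoop a b flag =
      (decide ((a.filter (fun x => !b.contains x)).length + (if flag then 1 else 0) ≤ 1) &&
       decide ((b.filter (fun y => !a.contains y)).length ≤ 1)) := by
  induction a with
  | nil =>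
    intro b flag _ _
    cases flag <;> simp [connectedLoop]
  | cons x rest ih =>
    intro b flag ha hb
    have hx : x ∉ rest := (List.nodup_cons.mp ha).1
    have hrest : rest.Nodup := (List.nodup_cons.mp ha).2
    by_cases hmem : x ∈ b
    · have h1 : rest.filter (fun y => !(b.erase x).contains y)
          = rest.filter (fun y => !b.contains y) := by
        apply List.filter_congr
        intro y hy
        have hyx : y ≠ x := fun h => hx (h ▸ hy)
        simp [List.mem_erase_of_ne hyx]
      have h2 : (b.erase x).filter (fun y => !rest.contains y)
          = b.filter (fun y => !(x :: rest).contains y) := by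
        rw [hb.erase_eq_filter, List.filter_filter]
        apply List.filter_congr
        intro y _
        by_cases hyx : y = x <;> simp [hyx]
      have h3 : (x :: rest).filter (fun y => !b.contains y)
          = rest.filter (fun y => !b.contains y) := by
        simp [hmem]
      rw [connectedLoop, if_pos (by simpa using hmem),
        ih (b.erase x) flag hrest (hb.erase x), h1, h2, h3]
    · have h3 : (x :: rest).filter (fun y => !b.contains y)
          = x :: rest.filter (fun y => !b.contains y) := by
        simp [hmem]
      have h4 : b.filter (fun y => !(x :: rest).contains y)
          = b.filter (fun y => !rest.contains y) := by
        apply List.filter_congr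
        intro y hy
        have hyx : y ≠ x := fun h => hmem (h ▸ hy)
        simp [hyx]
      rw [connectedLoop, if_neg (by simpa using hmem)]
      cases flag with
      | true => rw [h3]; simp
      | false =>
        rw [ih b true hrest hb, h3, h4]
        simp [Nat.add_comm]

theorem connected_eq_alt (a b : List String) (ha : a.Nodup) (hb : b.Nodup) :
    connected a b = connected_alt a b := by
  rw [connected, connectedLoop_eq a b false ha hb, connected_alt]
  simp

-- ===== VERDICT (by name: the statement is the Claim_ definition above) =====
theorem connected_spec : Claim_equal_connected := by
  intro a b _ hpre
  unfold Spec_connected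
  exact connected_eq_alt a b hpre.1 hpre.2
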